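-- pv_equiv track=rewrite | github.com/huggggoooooo/ProtoCycle | verl/tools/pfam/hmm_tools.py | filter_seq
-- ===== SOURCE A (Python) =====
-- ALPHABET20 = set("ACDEFGHIKLMNPQRSTVWY")
--
-- def filter_seq(seq: str, length_hint=None, max_run=1000) -> bool:
--     if not set(seq) <= ALPHABET20:
--         return False
--     if length_hint:
--         Lmin, Lmax = length_hint
--         if not (Lmin <= len(seq) <= Lmax):
--             return False
--     # max run of the same AA
--     r = 1
--     for i in range(1, len(seq)):
--         if seq[i] == seq[i-1]:
--             r += 1
--             if r > max_run:
--                 return False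
--         else:
--             r = 1
--     return True
-- ===== SOURCE B (Python) =====
-- ALPHABET20 = set("ACDEFGHIKLMNPQRSTVWY")
--
-- def filter_seq(seq: str, length_hint=None, max_run=1000) -> bool:
--     if not set(seq) <= ALPHABET20:
--         return False
--     if length_hint:
--         Lmin, Lmax = length_hint
--         if not (Lmin <= len(seq) <= Lmax):
--             return False
--     if not seq:
--         return True  # no runs to check
--     # positions where a new maximal run starts, bracketed by 0 and len(seq);
--     # consecutive cut positions delimit the maximal runs, so every gap must fit
--     cuts = [0] + [i for i, (a, b) in enumerate(zip(seq, seq[1:]), 1) if a != b] + [len(seq)]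
--     return all(t - s <= max_run for s, t in zip(cuts, cuts[1:]))
-- ===== Notes on version B (the rewrite author's own statement) =====
-- stated objective: alternative
-- what changed: A's running counter with reset and early return is replaced by materializing the list of run-boundary cut positions (via enumerate over zipped adjacent pairs) and then checking that every gap between consecutive cuts is at most max_run.
-- intended difference: When max_run <= 0 and a valid-alphabet, length-ok, nonempty sequence has no two adjacent equal characters, A returns True because its counter only tests the bound after an increment, while B returns False since even a run of length 1 exceeds max_run, which is the intended meaning of the bound. — e.g. on filter_seq("A", none, 0): A returns true, B returns false
import Mathlib
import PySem

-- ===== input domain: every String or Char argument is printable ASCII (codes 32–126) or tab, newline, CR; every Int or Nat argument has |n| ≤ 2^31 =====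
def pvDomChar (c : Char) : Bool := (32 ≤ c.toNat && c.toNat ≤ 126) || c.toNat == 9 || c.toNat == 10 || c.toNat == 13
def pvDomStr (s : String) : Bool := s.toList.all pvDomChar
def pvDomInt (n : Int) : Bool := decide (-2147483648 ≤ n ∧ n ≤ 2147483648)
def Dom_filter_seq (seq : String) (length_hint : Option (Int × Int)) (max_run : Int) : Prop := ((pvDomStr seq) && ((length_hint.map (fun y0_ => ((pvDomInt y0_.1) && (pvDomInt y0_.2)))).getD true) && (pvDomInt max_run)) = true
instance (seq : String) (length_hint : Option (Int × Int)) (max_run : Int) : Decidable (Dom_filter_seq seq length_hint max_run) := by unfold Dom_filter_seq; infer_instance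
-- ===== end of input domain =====

-- B replaces A's running-counter loop (with reset and early return) by materializing the list of
-- run-boundary cut positions and checking every gap between consecutive cuts against max_run
-- (alternative decomposition; same cost). Return value only; neither program mutates its arguments.

-- ===== PORT A =====
def ALPHABET20 : PySem.Set Char := PySem.Set.ofList "ACDEFGHIKLMNPQRSTVWY".toList

-- A's `for i in range(1, len(seq))` loop: prev = seq[i-1], r = current run counter
def filterSeqLoop (max_run : Int) (prev : Char) (r : Int) : List Char → Bool
  | [] => true
  | c :: rest =>
      if c == prev then
        if r + 1 > max_run then false else filterSeqLoop max_run c (r + 1) rest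
      else filterSeqLoop max_run c 1 rest

-- the run-counting part of A: r starts at 1, the loop walks seq[1:]
def filterSeqBody (max_run : Int) : List Char → Bool
  | [] => true
  | c :: rest => filterSeqLoop max_run c 1 rest

def filter_seq (seq : String) (length_hint : Option (Int × Int)) (max_run : Int) : Bool :=
  if !(PySem.Set.issubset (PySem.Set.ofList seq.toList) ALPHABET20) then false
  else
    let lenOk : Bool :=
      match length_hint with
      | none => true
      | some (lmin, lmax) => decide (lmin ≤ PySem.Str.len seq) && decide (PySem.Str.len seq ≤ lmax)
    if !lenOk then false
    else filterSeqBody max_run seq.toList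

-- ===== PORT B =====
-- `[0] + [i for i, (a, b) in enumerate(zip(seq, seq[1:]), 1) if a != b] + [len(seq)]`
def cutsB (l : List Char) : List Int :=
  (0 : Int) :: ((PySem.List.enumerate (l.zip l.tail) 1).filterMap
      (fun p => if p.2.1 != p.2.2 then some p.1 else none)) ++ [(l.length : Int)]

def filter_seq_alt (seq : String) (length_hint : Option (Int × Int)) (max_run : Int) : Bool :=
  if !(PySem.Set.issubset (PySem.Set.ofList seq.toList) ALPHABET20) then false
  else
    let lenOk : Bool :=
      match length_hint with
      | none => true
      | some (lmin, lmax) => decide (lmin ≤ PySem.Str.len seq) && decide (PySem.Str.len seq ≤ lmax)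
    if !lenOk then false
    else if seq.toList = [] then true
    else
      let cuts := cutsB seq.toList
      (cuts.zip cuts.tail).all (fun p => decide (p.2 - p.1 ≤ max_run))

-- ===== PRECONDITION & SPEC =====
-- When max_run ≤ 0 and a valid-alphabet, length-ok, nonempty sequence has no two adjacent equal
-- characters, A returns true because its counter only tests the bound after an increment, while B
-- returns false since even a run of length 1 exceeds max_run, which is the intended meaning of the bound.
def D_filter_seq (seq : String) (length_hint : Option (Int × Int)) (max_run : Int) : Prop :=
  max_run ≤ 0 ∧ seq ≠ "" ∧ seq.toList.IsChain (· ≠ ·) ∧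
  seq.toList.all ("ACDEFGHIKLMNPQRSTVWY".toList.contains ·) = true ∧
  ∀ p ∈ length_hint, p.1 ≤ (seq.length : Int) ∧ (seq.length : Int) ≤ p.2
instance (seq : String) (length_hint : Option (Int × Int)) (max_run : Int) : Decidable (D_filter_seq seq length_hint max_run) := by
  unfold D_filter_seq; infer_instance

def Spec_filter_seq (seq : String) (length_hint : Option (Int × Int)) (max_run : Int) (out : Bool) : Prop := ¬ D_filter_seq seq length_hint max_run → out = filter_seq_alt seq length_hint max_run
instance (seq : String) (length_hint : Option (Int × Int)) (max_run : Int) (out : Bool) : Decidable (Spec_filter_seq seq length_hint max_run out) := by unfold Spec_filter_seq; infer_instance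

def pvDiffWitness_filter_seq : String × (Option (Int × Int)) × Int := ("A", none, 0)
def pvDiffWitnessOut_filter_seq : Bool × Bool := (true, false)

-- ===== CLAIM (what is proved, stated in full; the proofs are below) =====
def Claim_unchanged_filter_seq : Prop := ∀ (seq : String) (length_hint : Option (Int × Int)) (max_run : Int), Dom_filter_seq seq length_hint max_run → Spec_filter_seq seq length_hint max_run (filter_seq seq length_hint max_run)
def Claim_changed_filter_seq : Prop := Dom_filter_seq (pvDiffWitness_filter_seq.1) (pvDiffWitness_filter_seq.2.1) (pvDiffWitness_filter_seq.2.2) ∧ D_filter_seq (pvDiffWitness_filter_seq.1) (pvDiffWitness_filter_seq.2.1) (pvDiffWitness_filter_seq.2.2) ∧ filter_seq (pvDiffWitness_filter_seq.1) (pvDiffWitness_filter_seq.2.1) (pvDiffWitness_filter_seq.2.2) = pvDiffWitnessOut_filter_seq.1 ∧ filter_seq_alt (pvDiffWitness_filter_seq.1) (pvDiffWitness_filter_seq.2.1) (pvDiffWitness_filter_seq.2.2) = pvDiffWitnessOut_filter_seq.2 ∧ pvDiffWitnessOut_filter_seq.1 ≠ pvDiffWitnessOut_filter_seq.2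
def Claim_exact_filter_seq : Prop := ∀ (seq : String) (length_hint : Option (Int × Int)) (max_run : Int), Dom_filter_seq seq length_hint max_run → D_filter_seq seq length_hint max_run → filter_seq seq length_hint max_run ≠ filter_seq_alt seq length_hint max_run

-- ===== LEMMAS AND PROOFS =====

-- proof-side: the lengths of the maximal equal runs, in order
def runsFrom (c : Char) (n : Int) : List Char → List Int
  | [] => [n]
  | d :: rest => if d == c then runsFrom c (n + 1) rest else n :: runsFrom d 1 rest

def runLengths : List Char → List Int
  | [] => []
  | c :: rest => runsFrom c 1 rest

-- proof-side: partial sums (each prefix sum, then the total)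
def psums (a : Int) : List Int → List Int
  | [] => [a]
  | x :: xs => a :: psums (a + x) xs

-- proof-side: recursive form of B's cut-position comprehension
def cutsRec (k : Int) (prev : Char) : List Char → List Int
  | [] => []
  | d :: rest => if prev != d then k :: cutsRec (k + 1) d rest else cutsRec (k + 1) d rest

-- true iff no two adjacent characters of the list are equal (proof-side abbreviation)
def noAdjEq (l : List Char) : Bool := (l.zip l.tail).all (fun p => p.1 != p.2)

-- B's comprehension over enumerate(zip(seq, seq[1:]), 1) computes cutsRec
theorem filterMap_enum_eq_cutsRec (rest : List Char) (prev : Char) (k : Int) :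
    (PySem.List.enumerate ((prev :: rest).zip rest) k).filterMap
        (fun p => if p.2.1 != p.2.2 then some p.1 else none) = cutsRec k prev rest := by
  induction rest generalizing prev k with
  | nil => simp [cutsRec, PySem.List.enumerate_nil]
  | cons d rest ih =>
      rw [List.zip_cons_cons, PySem.List.enumerate_cons]
      by_cases hd : (prev != d) = true
      · rw [List.filterMap_cons_some (b := k) (by simp [hd]), ih d (k + 1)]
        simp [cutsRec, hd]
      · rw [List.filterMap_cons_none (by simp [hd]), ih d (k + 1)]
        simp [cutsRec, hd]

-- partial sums of the run lengths are exactly the cut positions with both brackets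
theorem psums_runsFrom (rest : List Char) (prev : Char) (n s : Int) :
    psums s (runsFrom prev n rest) = s :: (cutsRec (s + n) prev rest ++ [s + n + rest.length]) := by
  induction rest generalizing prev n s with
  | nil => simp [runsFrom, psums, cutsRec]
  | cons d rest ih =>
      by_cases hd : d == prev
      · have : d = prev := by simpa using hd
        subst this
        simp only [runsFrom, BEq.rfl, if_true, cutsRec, bne_self_eq_false, Bool.false_eq_true,
          if_false]
        rw [ih d (n + 1) s]
        simp only [List.length_cons]
        push_cast
        ring_nf
      · have hne : (prev != d) = true := by
          simp only [bne_iff_ne]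
          intro h
          exact hd (by simp [h])
        simp only [runsFrom, hd, Bool.false_eq_true, if_false, psums, cutsRec, hne, if_true]
        rw [ih d 1 (s + n)]
        simp only [List.length_cons, List.cons_append]
        push_cast
        ring_nf

-- every psums list starts with its seed
theorem psums_head (a : Int) (xs : List Int) : ∃ t, psums a xs = a :: t := by
  cases xs <;> exact ⟨_, rfl⟩

-- gap check on partial sums = bound check on the summands
theorem gaps_psums (xs : List Int) (a m : Int) :
    ((psums a xs).zip (psums a xs).tail).all (fun p => decide (p.2 - p.1 ≤ m)) =
      xs.all (fun n => decide (n ≤ m)) := by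
  induction xs generalizing a with
  | nil => simp [psums]
  | cons x xs ih =>
      obtain ⟨t, ht⟩ := psums_head (a + x) xs
      have key : ((psums a (x :: xs)).zip (psums a (x :: xs)).tail) =
          (a, a + x) :: ((psums (a + x) xs).zip (psums (a + x) xs).tail) := by
        show ((a :: psums (a + x) xs).zip (psums (a + x) xs)) = _
        rw [ht]
        rfl
      rw [key, List.all_cons, ih (a + x), List.all_cons]
      congr 1
      simp only [decide_eq_decide]
      omega

-- B's gap check over cutsB = "every run length ≤ m"
theorem cutsB_check (l : List Char) (m : Int) (h : l ≠ []) :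
    ((cutsB l).zip (cutsB l).tail).all (fun p => decide (p.2 - p.1 ≤ m)) =
      (runLengths l).all (fun n => decide (n ≤ m)) := by
  cases l with
  | nil => exact absurd rfl h
  | cons c rest =>
      rw [← gaps_psums (runLengths (c :: rest)) 0 m]
      congr 1 <;>
      · rw [show runLengths (c :: rest) = runsFrom c 1 rest from rfl, psums_runsFrom,
          show cutsB (c :: rest) = (0 : Int) ::
            ((PySem.List.enumerate ((c :: rest).zip rest) 1).filterMap
              (fun p => if p.2.1 != p.2.2 then some p.1 else none)) ++ [((c :: rest).length : Int)]
            from rfl, filterMap_enum_eq_cutsRec]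
        simp only [List.length_cons, zero_add]
        push_cast
        simp [add_comm]

-- the first run emitted by runsFrom has length ≥ n, so the bound m < n kills the `all`
theorem runsFrom_all_false (rest : List Char) (c : Char) (n m : Int) (h : m < n) :
    (runsFrom c n rest).all (fun k => decide (k ≤ m)) = false := by
  induction rest generalizing c n with
  | nil => simp [runsFrom]; omega
  | cons d rest ih =>
      by_cases hd : d == c
      · simpa [runsFrom, hd] using ih c (n + 1) (by omega)
      · simp [runsFrom, hd]
        intro hnm
        omega

-- with 1 ≤ max_run, A's counter loop checks exactly that every maximal run fits in max_run
theorem loop_eq_runs (rest : List Char) (c : Char) (r m : Int)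
    (hm : 1 ≤ m) (hr : 1 ≤ r) (hrm : r ≤ m) :
    filterSeqLoop m c r rest = (runsFrom c r rest).all (fun k => decide (k ≤ m)) := by
  induction rest generalizing c r with
  | nil => simp [filterSeqLoop, runsFrom, hrm]
  | cons d rest ih =>
      by_cases hd : d == c
      · have hc : d = c := by simpa using hd
        subst hc
        by_cases hbig : r + 1 > m
        · rw [show filterSeqLoop m d r (d :: rest) =
              (if d == d then (if r + 1 > m then false else filterSeqLoop m d (r + 1) rest)
               else filterSeqLoop m d 1 rest) from rfl]
          simp [hbig, runsFrom, runsFrom_all_false rest d (r + 1) m (by omega)]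
        · rw [show filterSeqLoop m d r (d :: rest) =
              (if d == d then (if r + 1 > m then false else filterSeqLoop m d (r + 1) rest)
               else filterSeqLoop m d 1 rest) from rfl]
          simp only [BEq.rfl, if_true, if_neg hbig, runsFrom]
          exact ih d (r + 1) (by omega) (by omega)
      · simp only [filterSeqLoop, runsFrom, hd, Bool.false_eq_true, if_false, List.all_cons]
        rw [ih d 1 (by omega) hm]
        simp [hrm]

-- with max_run ≤ 0, A's loop returns true iff no two adjacent characters are equal
theorem loop_eq_noAdjEq (rest : List Char) (c : Char) (r m : Int)
    (hm : m ≤ 0) (hr : 1 ≤ r) :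
    filterSeqLoop m c r rest = noAdjEq (c :: rest) := by
  induction rest generalizing c r with
  | nil => simp [filterSeqLoop, noAdjEq]
  | cons d rest ih =>
      by_cases hd : d == c
      · have hc : d = c := by simpa using hd
        subst hc
        rw [show filterSeqLoop m d r (d :: rest) =
            (if d == d then (if r + 1 > m then false else filterSeqLoop m d (r + 1) rest)
             else filterSeqLoop m d 1 rest) from rfl,
          if_pos (BEq.rfl), if_pos (show r + 1 > m by omega)]
        simp [noAdjEq]
      · have hne : d ≠ c := by simpa using hd
        have hc : (c != d) = true := bne_iff_ne.mpr (Ne.symm hne)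
        simp only [filterSeqLoop, hd, Bool.false_eq_true, if_false, noAdjEq, List.tail,
          List.zip_cons_cons, List.all_cons, hc, Bool.true_and]
        exact ih d 1 (by omega)

-- noAdjEq is adjacent-distinctness, i.e. the chain condition of D_
theorem noAdjEq_iff (l : List Char) : noAdjEq l = true ↔ List.IsChain (· ≠ ·) l := by
  induction l with
  | nil => simp [noAdjEq]
  | cons a l ih =>
      cases l with
      | nil => simp [noAdjEq]
      | cons b l =>
          rw [List.isChain_cons_cons, ← ih]
          simp [noAdjEq]

-- the empty string is the one with empty character list
theorem toList_ne_nil_iff (s : String) : s.toList ≠ [] ↔ s ≠ "" := by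
  constructor
  · intro h hs
    exact h (by rw [hs]; rfl)
  · intro h hl
    exact h (String.toList_inj.mp (hl.trans rfl))

-- the subset guard of the ports, rephrased as D_'s alphabet condition
theorem subset_guard_iff (l : List Char) :
    PySem.Set.issubset (PySem.Set.ofList l) ALPHABET20 = true ↔
      l.all ("ACDEFGHIKLMNPQRSTVWY".toList.contains ·) = true := by
  rw [PySem.Set.issubset_iff, List.all_eq_true]
  constructor
  · intro h c hc
    have := h c (by simpa [PySem.Set.mem_ofList] using hc)
    simpa [ALPHABET20, PySem.Set.mem_ofList] using this
  · intro h c hc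
    have := h c (by simpa [PySem.Set.mem_ofList] using hc)
    simpa [ALPHABET20, PySem.Set.mem_ofList] using this

-- A's run check agrees with "every run length ≤ m" unless max_run ≤ 0 meets an adjacent-equal-free list
theorem core_eq (l : List Char) (m : Int) (h : 1 ≤ m ∨ noAdjEq l = false) :
    filterSeqBody m l = (runLengths l).all (fun n => decide (n ≤ m)) := by
  cases l with
  | nil => simp [filterSeqBody, runLengths]
  | cons c rest =>
      simp only [filterSeqBody, runLengths]
      by_cases hm : 1 ≤ m
      · exact loop_eq_runs rest c 1 m hm (by omega) hm
      · have hm0 : m ≤ 0 := by omega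
        have hfalse : noAdjEq (c :: rest) = false := by
          rcases h with h | h
          · omega
          · exact h
        rw [loop_eq_noAdjEq rest c 1 m hm0 (by omega), hfalse,
          runsFrom_all_false rest c 1 m (by omega)]

-- outside D_, A's body agrees with B's gap check (list-level form of the main claim's core)
theorem core_eq_of_listOK (l : List Char) (m : Int)
    (h : ¬ (l ≠ [] ∧ m ≤ 0 ∧ noAdjEq l = true)) :
    filterSeqBody m l =
      (if l = [] then true
       else ((cutsB l).zip (cutsB l).tail).all (fun p => decide (p.2 - p.1 ≤ m))) := by
  by_cases hne : l = []
  · rw [hne]; simp [filterSeqBody]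
  · rw [if_neg hne, cutsB_check l m hne]
    apply core_eq
    by_cases hm : 1 ≤ m
    · exact Or.inl hm
    · refine Or.inr ?_
      by_contra hchain
      exact h ⟨hne, by omega, by simpa using hchain⟩

theorem filter_seq_spec : Claim_unchanged_filter_seq := by
  intro seq lh m _ hnD
  show filter_seq seq lh m = filter_seq_alt seq lh m
  unfold filter_seq filter_seq_alt
  cases hsub : PySem.Set.issubset (PySem.Set.ofList seq.toList) ALPHABET20 with
  | false => simp
  | true =>
      rcases lh with _ | ⟨a, b⟩
      · simp only [Bool.not_true, Bool.false_eq_true, if_false]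
        apply core_eq_of_listOK
        rintro ⟨hne, hm0, hchain⟩
        exact hnD ⟨hm0, (toList_ne_nil_iff seq).mp hne, (noAdjEq_iff _).mp hchain,
          (subset_guard_iff seq.toList).mp hsub, by simp⟩
      · simp only [Bool.not_true, Bool.false_eq_true, if_false]
        split_ifs with hg hnil
        · rfl
        · rw [hnil]; rfl
        · rw [cutsB_check _ _ hnil]
          apply core_eq
          by_cases hm : 1 ≤ m
          · exact Or.inl hm
          · refine Or.inr ?_
            by_contra hchain
            refine hnD ⟨by omega, (toList_ne_nil_iff seq).mp hnil,
              (noAdjEq_iff _).mp (by simpa using hchain),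
              (subset_guard_iff seq.toList).mp hsub, ?_⟩
            have hg' : (decide (a ≤ PySem.Str.len seq) && decide (PySem.Str.len seq ≤ b)) = true := by
              simpa using hg
            simp only [Bool.and_eq_true, decide_eq_true_eq, PySem.Str.len_eq] at hg'
            intro p hp
            obtain rfl : (a, b) = p := by simpa using hp
            exact hg'

theorem filter_seq_tight : Claim_exact_filter_seq := by
  intro seq lh m _ hD
  obtain ⟨hm0, hne0, hchain0, halpha, hlen⟩ := hD
  have hne : seq.toList ≠ [] := (toList_ne_nil_iff seq).mpr hne0
  have hchain : noAdjEq seq.toList = true := (noAdjEq_iff _).mpr hchain0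
  have hsub : PySem.Set.issubset (PySem.Set.ofList seq.toList) ALPHABET20 = true :=
    (subset_guard_iff seq.toList).mpr halpha
  unfold filter_seq filter_seq_alt
  have hbody : filterSeqBody m seq.toList = true := by
    cases hseq : seq.toList with
    | nil => exact absurd hseq hne
    | cons c rest =>
        rw [hseq] at hchain
        simpa [filterSeqBody, hchain] using loop_eq_noAdjEq rest c 1 m hm0 (by omega)
  have halt : ((cutsB seq.toList).zip (cutsB seq.toList).tail).all
      (fun p => decide (p.2 - p.1 ≤ m)) = false := by
    rw [cutsB_check seq.toList m hne]
    cases hseq : seq.toList with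
    | nil => exact absurd hseq hne
    | cons c rest =>
        simpa [runLengths] using runsFrom_all_false rest c 1 m (by omega)
  rcases lh with _ | ⟨a, b⟩
  · simp only [hsub, Bool.not_true, Bool.false_eq_true, if_false, if_neg hne]
    rw [hbody, halt]; decide
  · have h2 := hlen (a, b) (by simp)
    have hlenOk : (decide (a ≤ PySem.Str.len seq) && decide (PySem.Str.len seq ≤ b)) = true := by
      simp only [PySem.Str.len_eq, Bool.and_eq_true, decide_eq_true_eq]
      exact h2
    simp only [hsub, hlenOk, Bool.not_true, Bool.false_eq_true, if_false, if_neg hne]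
    rw [hbody, halt]; decide

theorem filter_seq_changed : Claim_changed_filter_seq := by
  unfold Claim_changed_filter_seq; decide
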